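-- pv_equiv track=rewrite | github.com/Significant-Gravitas/AutoGPT | Auto-GPT-venv/lib/python3.10/site-packages/numpy/distutils/from_template.py | unique_key
-- ===== SOURCE A (Python) =====
-- def unique_key(adict):
--     """ Obtain a unique key given a dictionary."""
--     allkeys = list(adict.keys())
--     done = False
--     n = 1
--     while not done:
--         newkey = '__l%s' % (n)
--         if newkey in allkeys:
--             n += 1
--         else:
--             done = True
--     return newkey
-- ===== SOURCE B (Python) =====
-- def unique_key(adict):
--     """ Obtain a unique key given a dictionary."""
--     # sort-then-scan: collect the canonically named '__l<n>' indices, sort them,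
--     # and walk the sorted run starting at 1 to find the first gap.
--     taken = sorted({int(key[3:]) for key in adict
--                     if isinstance(key, str) and key.startswith('__l')
--                     and key[3:].isdigit() and '__l%s' % int(key[3:]) == key})
--     n = 1
--     for m in taken:
--         if m > n:
--             break
--         if m == n:
--             n += 1
--     return '__l%s' % n
-- ===== Notes on version B (the rewrite author's own statement) =====
-- stated objective: alternative
-- what changed: A probes candidate keys '__l1','__l2',... one at a time against the key list; B instead parses out all canonically named '__l<n>' indices, sorts them, and walks the sorted run from 1 to find the first gap (sort-then-scan instead of generate-and-probe).
import Mathlib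
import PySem

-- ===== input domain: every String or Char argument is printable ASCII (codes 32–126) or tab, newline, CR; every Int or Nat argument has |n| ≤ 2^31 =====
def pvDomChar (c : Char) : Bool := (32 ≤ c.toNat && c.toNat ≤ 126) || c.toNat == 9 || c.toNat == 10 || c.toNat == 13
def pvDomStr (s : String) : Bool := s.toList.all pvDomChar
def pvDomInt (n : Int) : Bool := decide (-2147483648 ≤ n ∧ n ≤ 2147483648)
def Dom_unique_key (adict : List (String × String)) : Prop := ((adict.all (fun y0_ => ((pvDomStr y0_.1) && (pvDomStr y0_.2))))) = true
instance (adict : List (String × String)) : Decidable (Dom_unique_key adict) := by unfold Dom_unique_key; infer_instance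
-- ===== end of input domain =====

-- B replaces A's generate-and-probe loop by sort-then-scan: parse the canonically named
-- '__l<n>' indices out of the keys, sort them, and walk the sorted run from 1 to the first gap.

-- ===== PORT A =====
-- Python A's 'while not done' loop; the fuel 'len(allkeys)+1' is an upper bound on the
-- number of iterations the Python loop performs (each probe that hits consumes a distinct key).
def pvLoopA (allkeys : List String) : Nat → Int → String
  | 0, n => "__l" ++ PySem.Int.toStr n
  | fuel+1, n =>
    let newkey := "__l" ++ PySem.Int.toStr n            -- '__l%s' % n
    if allkeys.contains newkey then pvLoopA allkeys fuel (n + 1)   -- newkey in allkeys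
    else newkey

def unique_key (adict : List (String × String)) : String :=
  let allkeys := PySem.Dict.keys (PySem.Dict.ofList adict)   -- list(adict.keys())
  pvLoopA allkeys (allkeys.length + 1) 1

-- ===== PORT B =====
-- int(suffix): exact hand port of Python's int() on the strings reaching it — the guard
-- guarantees suffix.isdigit(), and on all-digit ASCII strings int() is this base-10 fold.
def pvDecode (cs : List Char) : Int :=
  ((cs.foldl (fun a c => a * 10 + (c.toNat - 48)) 0 : Nat) : Int)

-- the guard of B's set comprehension: some n iff key is the canonical '__l<n>'
def pvParseKey (k : String) : Option Int :=
  if PySem.Chars.startswith k.toList "__l".toList then   -- key.startswith('__l')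
    let suffix := k.toList.drop 3                        -- key[3:]
    if PySem.Chars.strIsdigit suffix then                -- key[3:].isdigit()
      let m := pvDecode suffix                           -- int(key[3:])
      if ("__l" ++ PySem.Int.toStr m) == k then some m else none   -- '__l%s' % int(key[3:]) == key
    else none
  else none

-- B's 'for m in taken' loop with its break: first gap at or after n in the sorted run
def pvScan : List Int → Int → Int
  | [], n => n
  | m :: ms, n =>
    if n < m then n                                      -- if m > n: break
    else if m = n then pvScan ms (n + 1)                 -- if m == n: n += 1
    else pvScan ms n

def unique_key_alt (adict : List (String × String)) : String :=
  let keys := PySem.Dict.keys (PySem.Dict.ofList adict)  -- for key in adict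
  -- sorted({int(key[3:]) for key in adict if …})
  let taken := PySem.List.sorted (PySem.Set.ofList (keys.filterMap pvParseKey)) (fun x => x) false
  "__l" ++ PySem.Int.toStr (pvScan taken 1)              -- '__l%s' % n

-- ===== PRECONDITION & SPEC =====
def Spec_unique_key (adict : List (String × String)) (out : String) : Prop := out = unique_key_alt adict
instance (adict : List (String × String)) (out : String) : Decidable (Spec_unique_key adict out) := by unfold Spec_unique_key; infer_instance

-- ===== CLAIM (what is proved, stated in full; the proofs are below) =====
def Claim_equal_unique_key : Prop := ∀ (adict : List (String × String)), Dom_unique_key adict → Spec_unique_key adict (unique_key adict)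

-- ===== LEMMAS AND PROOFS =====

-- canonical decimal digits of a natural number, most significant first
def pvDigits (n : Nat) : List Char :=
  if n < 10 then [Nat.digitChar n]
  else pvDigits (n / 10) ++ [Nat.digitChar (n % 10)]
decreasing_by exact Nat.div_lt_self (by omega) (by omega)

lemma pvToDigitsCore_eq (fuel : Nat) : ∀ (n : Nat) (ds : List Char), n < fuel →
    Nat.toDigitsCore 10 fuel n ds = pvDigits n ++ ds := by
  induction fuel with
  | zero => omega
  | succ fuel ih =>
    intro n ds h
    rw [Nat.toDigitsCore]
    by_cases h10 : n / 10 = 0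
    · rw [if_pos h10, pvDigits]
      rw [if_pos (by omega), Nat.mod_eq_of_lt (by omega)]
      rfl
    · have hlt : n / 10 < n := Nat.div_lt_self (by omega) (by omega)
      rw [if_neg h10, ih (n / 10) _ (by omega)]
      conv_rhs => rw [pvDigits]
      rw [if_neg (by omega)]
      simp

lemma pvToChars_eq (n : Int) (h : 0 ≤ n) : PySem.Int.toChars n = pvDigits n.toNat := by
  rw [PySem.Int.toChars, if_neg (by omega), Nat.toDigits,
      pvToDigitsCore_eq _ _ _ (by omega), List.append_nil]

lemma pvDigitChar_toNat (k : Nat) (h : k < 10) : (Nat.digitChar k).toNat = 48 + k := by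
  interval_cases k <;> decide

lemma pvDigitChar_isdigit (k : Nat) (h : k < 10) : PySem.Chars.isdigit (Nat.digitChar k) = true := by
  interval_cases k <;> decide

lemma pvDigits_ne_nil (n : Nat) : pvDigits n ≠ [] := by
  rw [pvDigits]; split <;> simp

lemma pvDigits_all_digit (n : Nat) : ∀ c ∈ pvDigits n, PySem.Chars.isdigit c = true := by
  induction n using Nat.strong_induction_on with
  | _ n ih =>
    rw [pvDigits]
    split
    · intro c hc
      simp at hc
      subst hc
      exact pvDigitChar_isdigit _ (by omega)
    · intro c hc
      simp at hc
      rcases hc with hc | hc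
      · exact ih (n / 10) (Nat.div_lt_self (by omega) (by omega)) c hc
      · subst hc; exact pvDigitChar_isdigit _ (Nat.mod_lt _ (by omega))

lemma pvDigits_foldl (n : Nat) : ∀ (a : Nat),
    (pvDigits n).foldl (fun a c => a * 10 + (c.toNat - 48)) a
      = a * 10 ^ (pvDigits n).length + n := by
  induction n using Nat.strong_induction_on with
  | _ n ih =>
    intro a
    rw [pvDigits]
    split
    · next h =>
      simp [List.foldl, pvDigitChar_toNat n h]
    · next h =>
      rw [List.foldl_append, ih (n / 10) (Nat.div_lt_self (by omega) (by omega)) a]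
      simp [List.foldl, pvDigitChar_toNat (n % 10) (Nat.mod_lt _ (by omega))]
      rw [pow_succ]
      have := Nat.div_add_mod n 10
      ring_nf
      omega

lemma pvDecode_toChars (n : Int) (h : 0 ≤ n) : pvDecode (PySem.Int.toChars n) = n := by
  rw [pvToChars_eq n h, pvDecode, pvDigits_foldl]
  omega

lemma pvKey_toList (n : Int) :
    ("__l" ++ PySem.Int.toStr n).toList = ['_', '_', 'l'] ++ PySem.Int.toChars n := by
  rw [String.toList_append, PySem.Int.toList_toStr]
  rfl

-- completeness: the canonical key of n parses back to n
lemma pvParse_complete (n : Int) (h : 0 ≤ n) :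
    pvParseKey ("__l" ++ PySem.Int.toStr n) = some n := by
  have hk := pvKey_toList n
  have hs : PySem.Chars.startswith ("__l" ++ PySem.Int.toStr n).toList "__l".toList = true := by
    rw [PySem.Chars.startswith_iff, hk]
    exact ⟨PySem.Int.toChars n, rfl⟩
  have hdrop : ("__l" ++ PySem.Int.toStr n).toList.drop 3 = PySem.Int.toChars n := by
    rw [hk]; rfl
  have hdig : PySem.Chars.strIsdigit (PySem.Int.toChars n) = true := by
    rw [PySem.Chars.strIsdigit, pvToChars_eq n h]
    simp only [Bool.and_eq_true, List.all_eq_true]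
    exact ⟨by simp [pvDigits_ne_nil], pvDigits_all_digit _⟩
  rw [pvParseKey, if_pos hs]
  simp only [hdrop, hdig, if_pos, pvDecode_toChars n h]
  simp

-- soundness: a successful parse pins the key to the canonical form
lemma pvParse_sound (k : String) (n : Int) (h : pvParseKey k = some n) :
    k = "__l" ++ PySem.Int.toStr n := by
  simp only [pvParseKey] at h
  split_ifs at h with h1 h2 h3
  injection h with h'
  rw [← h']
  exact (beq_iff_eq.mp h3).symm

-- membership in B's sorted list ↔ the canonical key is present (n ≥ 0)
lemma pvMem_taken (keys : List String) (n : Int) (hn : 0 ≤ n) :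
    n ∈ PySem.List.sorted (PySem.Set.ofList (keys.filterMap pvParseKey)) (fun x => x) false
      ↔ ("__l" ++ PySem.Int.toStr n) ∈ keys := by
  rw [PySem.List.mem_sorted, PySem.Set.mem_ofList, List.mem_filterMap]
  constructor
  · rintro ⟨k, hk, hp⟩
    rwa [pvParse_sound k n hp] at hk
  · intro hm
    exact ⟨_, hm, pvParse_complete n hn⟩

-- the scan of a strictly increasing list returns the first gap at or after n
lemma pvScan_spec (L : List Int) (hL : L.Pairwise (· < ·)) : ∀ (n : Int),
    n ≤ pvScan L n ∧ pvScan L n ∉ L ∧ ∀ k, n ≤ k → k < pvScan L n → k ∈ L := by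
  induction L with
  | nil =>
    intro n
    refine ⟨le_refl n, by simp [pvScan], ?_⟩
    intro k h1 h2
    simp only [pvScan] at h2
    exact absurd h1 (by omega)
  | cons m ms ih =>
    have hms := (List.pairwise_cons.mp hL).2
    have hhead := (List.pairwise_cons.mp hL).1
    intro n
    by_cases h1 : n < m
    · refine ⟨by simp [pvScan, h1], ?_, ?_⟩
      · simp [pvScan, h1]
        constructor
        · omega
        · intro hmem; exact absurd (hhead n hmem) (by omega)
      · intro k hk1 hk2; simp [pvScan, h1] at hk2; omega
    · by_cases h2 : m = n
      · obtain ⟨ha, hb, hc⟩ := ih hms (n + 1)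
        refine ⟨?_, ?_, ?_⟩
        · simp [pvScan, h2]; omega
        · simp only [pvScan, if_neg h1, if_pos h2, List.mem_cons]
          push Not
          exact ⟨by omega, hb⟩
        · intro k hk1 hk2
          simp only [pvScan, if_neg h1, if_pos h2] at hk2
          rcases eq_or_lt_of_le hk1 with rfl | hgt
          · exact List.mem_cons.mpr (Or.inl h2.symm)
          · exact List.mem_cons_of_mem _ (hc k (by omega) hk2)
      · obtain ⟨ha, hb, hc⟩ := ih hms n
        have hlt : m < n := by omega
        refine ⟨?_, ?_, ?_⟩
        · simpa [pvScan, h1, h2] using ha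
        · simp only [pvScan, if_neg h1, if_neg h2, List.mem_cons]
          push Not
          exact ⟨by omega, hb⟩
        · intro k hk1 hk2
          simp only [pvScan, if_neg h1, if_neg h2] at hk2
          exact List.mem_cons_of_mem _ (hc k hk1 hk2)

-- A's probe loop returns the FIRST free canonical key, given enough fuel to reach it
lemma pvLoopA_eq (keys : List String) : ∀ (fuel : Nat) (n r : Int), n ≤ r → r < n + fuel →
    ("__l" ++ PySem.Int.toStr r) ∉ keys →
    (∀ k, n ≤ k → k < r → ("__l" ++ PySem.Int.toStr k) ∈ keys) →
    pvLoopA keys fuel n = "__l" ++ PySem.Int.toStr r := by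
  intro fuel
  induction fuel with
  | zero => intro n r h1 h2 _ _; omega
  | succ fuel ih =>
    intro n r h1 h2 hfree hbusy
    rw [pvLoopA]
    rcases eq_or_lt_of_le h1 with rfl | hlt
    · rw [if_neg (by simpa [List.contains_iff_mem] using hfree)]
    · rw [if_pos (by simpa [List.contains_iff_mem] using hbusy n le_rfl hlt)]
      exact ih (n + 1) r (by omega) (by omega) hfree (fun k hk1 hk2 => hbusy k (by omega) hk2)

-- the first gap is at most (number of keys) + 1: the integers 1..r-1 are all taken
lemma pvScan_le (L : List Int)
    (hmem : ∀ k, (1:Int) ≤ k → k < pvScan L 1 → k ∈ L)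
    : pvScan L 1 ≤ (L.length : Int) + 1 := by
  by_contra hcon
  push Not at hcon
  -- the integers 1 .. L.length + 1 are all below the gap, hence all in L
  have hsub : PySem.List.pyRange 1 ((L.length : Int) + 2) 1 ⊆ L := by
    intro x hx
    rw [PySem.List.mem_pyRange_one] at hx
    exact hmem x hx.1 (by omega)
  have := List.Subperm.length_le (List.subperm_of_subset (PySem.List.nodup_pyRange_one 1 _) hsub)
  rw [PySem.List.length_pyRange_one] at this
  omega

-- ===== VERDICT (by name: the statement is the Claim_ definition above) =====
theorem unique_key_spec : Claim_equal_unique_key := by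
  intro adict _
  unfold Spec_unique_key unique_key unique_key_alt
  set keys := PySem.Dict.keys (PySem.Dict.ofList adict) with hkeys
  set L := PySem.List.sorted (PySem.Set.ofList (keys.filterMap pvParseKey)) (fun x => x) false with hL
  have hpw : L.Pairwise (· < ·) := PySem.List.sorted_ofList_pairwise_lt _
  obtain ⟨h1, h2, h3⟩ := pvScan_spec L hpw 1
  have hlen : (L.length : Int) ≤ (keys.length : Int) := by
    have e1 : L.length = (PySem.Set.ofList (keys.filterMap pvParseKey)).length :=
      PySem.List.length_sorted _ _ _
    have e2 := PySem.Set.length_ofList_le (keys.filterMap pvParseKey)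
    have e3 := List.length_filterMap_le pvParseKey keys
    omega
  have hbound : pvScan L 1 < 1 + ((keys.length + 1 : Nat) : Int) := by
    have := pvScan_le L h3
    push_cast
    omega
  refine pvLoopA_eq keys (keys.length + 1) 1 (pvScan L 1) h1 hbound ?_ ?_
  · intro hmem
    exact h2 ((pvMem_taken keys _ (by omega)).mpr hmem)
  · intro k hk1 hk2
    exact (pvMem_taken keys k (by omega)).mp (h3 k hk1 hk2)
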